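-- pv_equiv track=rewrite | github.com/ImanTabari/Assessments | wise/task2.py | getRequestStatus
-- ===== SOURCE A (Python) =====
-- def getRequestStatus(requests):
--     result = []
--     result.append('{status: 200, message: OK}')
--
--     for i in range(1, len(requests)):
--         if requests[max(i-30, 0):i].count(requests[i]) >= 5:
--             result.append('{status: 429, message: Too many requests}')
--             requests[i] = ""
--             continue
--         if requests[max(i-5, 0):i].count(requests[i]) >= 2:
--             result.append('{status: 429, message: Too many requests}')
--             requests[i] = ""
--             continue
--
--         result.append('{status: 200, message: OK}')
--     return result
-- ===== SOURCE B (Python) =====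
-- # B: incremental sliding-window count tables instead of re-slicing and re-counting per index.
-- # Note: A mutates its argument in place (sets flagged entries to ""); B does not mutate — equivalence is about the return value.
-- OK = '{status: 200, message: OK}'
-- TOO_MANY = '{status: 429, message: Too many requests}'
--
-- def _push(win, cnt, cap, v):
--     win.append(v)
--     cnt[v] = cnt.get(v, 0) + 1
--     if len(win) > cap:
--         old = win.pop(0)
--         cnt[old] -= 1
--
-- def getRequestStatus(requests):
--     result = [OK]
--     win30, cnt30 = [], {}
--     win5, cnt5 = [], {}
--     if requests:
--         _push(win30, cnt30, 30, requests[0])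
--         _push(win5, cnt5, 5, requests[0])
--         for v in requests[1:]:
--             if cnt30.get(v, 0) >= 5 or cnt5.get(v, 0) >= 2:
--                 result.append(TOO_MANY)
--                 v = ""
--             else:
--                 result.append(OK)
--             _push(win30, cnt30, 30, v)
--             _push(win5, cnt5, 5, v)
--     return result
-- ===== Notes on version B (the rewrite author's own statement) =====
-- stated objective: alternative
-- what changed: Replaces A's per-index re-slicing of the request list and linear .count scans (after mirroring A's in-place blanking) by a single pass that incrementally maintains the 30- and 5-entry sliding windows together with count tables keyed by value, so each step does O(1) dictionary lookups/updates instead of rebuilding and rescanning slices; B does not mutate its argument.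
import Mathlib
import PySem

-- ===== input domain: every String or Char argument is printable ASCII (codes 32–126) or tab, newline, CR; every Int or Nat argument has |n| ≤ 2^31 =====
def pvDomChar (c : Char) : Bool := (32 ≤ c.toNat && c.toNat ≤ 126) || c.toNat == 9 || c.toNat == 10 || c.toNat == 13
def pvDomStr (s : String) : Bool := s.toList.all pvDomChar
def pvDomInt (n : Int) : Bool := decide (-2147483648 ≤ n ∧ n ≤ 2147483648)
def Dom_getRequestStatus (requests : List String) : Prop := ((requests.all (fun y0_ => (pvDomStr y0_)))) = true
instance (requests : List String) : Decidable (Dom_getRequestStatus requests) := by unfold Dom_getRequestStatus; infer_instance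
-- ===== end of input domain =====

-- B maintains incremental sliding-window count tables instead of A's per-index slice-and-count
-- scans (objective: alternative). A mutates its argument in place (flagged entries become "");
-- B does not mutate — the equivalence proved is about the return value.

-- ===== PORT A =====
def pvOk : String := "{status: 200, message: OK}"
def pvTooMany : String := "{status: 429, message: Too many requests}"

def getRequestStatus (requests : List String) : List String :=
  -- result = ['{status: 200, message: OK}']; for i in range(1, len(requests)): …
  -- state = (requests as mutated so far, result); requests[i] is always in range (1 ≤ i < len),
  -- so pyGetD with default "" is exact here.
  let st := (PySem.List.pyRange 1 (requests.length : Int) 1).foldl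
    (fun (st : List String × List String) (i : Int) =>
      let reqs := st.1
      let result := st.2
      let v := PySem.List.pyGetD reqs i ""
      if 5 ≤ PySem.List.count (PySem.List.slice reqs (some (max (i - 30) 0)) (some i)) v then
        (reqs.set i.toNat "", result ++ [pvTooMany])
      else if 2 ≤ PySem.List.count (PySem.List.slice reqs (some (max (i - 5) 0)) (some i)) v then
        (reqs.set i.toNat "", result ++ [pvTooMany])
      else
        (reqs, result ++ [pvOk]))
    (requests, [pvOk])
  st.2

-- ===== PORT B =====
-- _push(win, cnt, cap, v) from Source B: append v, bump its count, evict the oldest when over cap.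
def pvPush (win : List String) (cnt : PySem.Dict String Int) (cap : Nat) (v : String) :
    List String × PySem.Dict String Int :=
  let win := win ++ [v]
  let cnt := cnt.insert v (cnt.getD v 0 + 1)
  if cap < win.length then
    match win with
    | [] => (win, cnt)  -- unreachable: win ends in [v]
    | old :: rest => (rest, cnt.insert old (cnt.getD old 0 - 1))
  else (win, cnt)

def pvLoopB : List String → List String → PySem.Dict String Int →
    List String → PySem.Dict String Int → List String → List String
  | [], _, _, _, _, res => res
  | v :: vs, w30, c30, w5, c5, res =>
    if 5 ≤ c30.getD v 0 ∨ 2 ≤ c5.getD v 0 then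
      let p30 := pvPush w30 c30 30 ""
      let p5 := pvPush w5 c5 5 ""
      pvLoopB vs p30.1 p30.2 p5.1 p5.2 (res ++ [pvTooMany])
    else
      let p30 := pvPush w30 c30 30 v
      let p5 := pvPush w5 c5 5 v
      pvLoopB vs p30.1 p30.2 p5.1 p5.2 (res ++ [pvOk])

def getRequestStatus_alt (requests : List String) : List String :=
  match requests with
  | [] => [pvOk]
  | r0 :: rest =>
    let p30 := pvPush [] PySem.Dict.empty 30 r0
    let p5 := pvPush [] PySem.Dict.empty 5 r0
    pvLoopB rest p30.1 p30.2 p5.1 p5.2 [pvOk]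

-- ===== PRECONDITION & SPEC =====
def Spec_getRequestStatus (requests : List String) (out : List String) : Prop := out = getRequestStatus_alt requests
instance (requests : List String) (out : List String) : Decidable (Spec_getRequestStatus requests out) := by unfold Spec_getRequestStatus; infer_instance

-- ===== CLAIM (what is proved, stated in full; the proofs are below) =====
def Claim_equal_getRequestStatus : Prop := ∀ (requests : List String), Dom_getRequestStatus requests → Spec_getRequestStatus requests (getRequestStatus requests)

-- ===== LEMMAS AND PROOFS =====

-- counter update: bumping x's count tracks appending [x] to the tracked window
theorem pv_cnt_add (c : PySem.Dict String Int) (w : List String) (x : String)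
    (hc : ∀ u, c.getD u 0 = (w.count u : Int)) :
    ∀ u, (c.insert x (c.getD x 0 + 1)).getD u 0 = ((w ++ [x]).count u : Int) := by
  intro u
  rw [PySem.Dict.getD_insert]
  by_cases h : u = x
  · subst h; simp [hc u, List.count_append]
  · simp [h, hc u, List.count_append, Ne.symm h]

-- counter update: decrementing the evicted head tracks dropping it from the window
theorem pv_cnt_evict (c : PySem.Dict String Int) (h : String) (t : List String)
    (hc : ∀ u, c.getD u 0 = ((h :: t).count u : Int)) :
    ∀ u, (c.insert h (c.getD h 0 - 1)).getD u 0 = (t.count u : Int) := by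
  intro u
  rw [PySem.Dict.getD_insert]
  by_cases e : u = h
  · subst e; simp [hc u]
  · simp [e, hc u, Ne.symm e]

-- pvPush keeps the counter equal to the multiset of its window
theorem pvPush_count (w : List String) (c : PySem.Dict String Int) (a : Nat) (x : String)
    (hc : ∀ u, c.getD u 0 = (w.count u : Int)) :
    ∀ u, (pvPush w c a x).2.getD u 0 = (((pvPush w c a x).1).count u : Int) := by
  have hadd := pv_cnt_add c w x hc
  unfold pvPush
  by_cases hl : a < (w ++ [x]).length
  · simp only [hl, if_true]
    cases hw : w ++ [x] with
    | nil => simp at hw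
    | cons hh tt =>
      simp only []
      rw [hw] at hadd
      exact pv_cnt_evict _ hh tt hadd
  · simp only [hl, if_false]
    exact hadd

-- pvPush on the window of the last ≤ a elements of t yields the last ≤ a elements of t ++ [x]
theorem pvPush_window (t : List String) (x : String) (a : Nat) (ha : 0 < a)
    (c : PySem.Dict String Int) :
    (pvPush (t.drop (t.length - a)) c a x).1 = (t ++ [x]).drop (t.length + 1 - a) := by
  unfold pvPush
  by_cases hn : a ≤ t.length
  · have hlen : (t.drop (t.length - a)).length = a := by
      simp [List.length_drop]; omega
    have hcond : a < (t.drop (t.length - a) ++ [x]).length := by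
      simp [hlen]
    rw [if_pos hcond]
    obtain ⟨hh, tt, hw⟩ : ∃ hh tt, t.drop (t.length - a) = hh :: tt := by
      cases hww : t.drop (t.length - a) with
      | nil => rw [hww] at hlen; simp at hlen; omega
      | cons y ys => exact ⟨y, ys, rfl⟩
    rw [hw]
    simp only [List.cons_append]
    have : tt = (t.drop (t.length - a)).tail := by rw [hw]; rfl
    rw [this, List.tail_drop]
    rw [show t.length + 1 - a = t.length - a + 1 from by omega]
    rw [List.drop_append_of_le_length (by omega)]
  · have hlen : (t.drop (t.length - a)).length = t.length := by
      simp [List.length_drop]; omega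
    have hcond : ¬ a < (t.drop (t.length - a) ++ [x]).length := by
      simp [hlen]; omega
    rw [if_neg hcond]
    have h1 : t.length - a = 0 := by omega
    have h2 : t.length + 1 - a = 0 := by omega
    simp [h1, h2]

-- A's loop body as a named function (getRequestStatus's fold body is definitionally pvStepA)
def pvStepA (st : List String × List String) (j : Int) : List String × List String :=
  let rq := st.1
  let result := st.2
  let v := PySem.List.pyGetD rq j ""
  if 5 ≤ PySem.List.count (PySem.List.slice rq (some (max (j - 30) 0)) (some j)) v then
    (rq.set j.toNat "", result ++ [pvTooMany])
  else if 2 ≤ PySem.List.count (PySem.List.slice rq (some (max (j - 5) 0)) (some j)) v then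
    (rq.set j.toNat "", result ++ [pvTooMany])
  else
    (rq, result ++ [pvOk])

theorem pv_main (rest : List String) : ∀ (i : Nat) (reqs res : List String)
    (c30 c5 : PySem.Dict String Int),
    1 ≤ i → rest = reqs.drop i →
    (∀ u, c30.getD u 0 = (((reqs.take i).drop (i - 30)).count u : Int)) →
    (∀ u, c5.getD u 0 = (((reqs.take i).drop (i - 5)).count u : Int)) →
    ((PySem.List.pyRange (i : Int) (reqs.length : Int) 1).foldl
      pvStepA (reqs, res)).2
      = pvLoopB rest ((reqs.take i).drop (i - 30)) c30 ((reqs.take i).drop (i - 5)) c5 res := by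
  induction rest with
  | nil =>
    intro i reqs res c30 c5 h1 hdrop hc30 hc5
    have hlen : reqs.length ≤ i := List.drop_eq_nil_iff.mp hdrop.symm
    have : PySem.List.pyRange (i : Int) (reqs.length : Int) 1 = [] := by
      simp [PySem.List.pyRange]; omega
    rw [this]
    simp [pvLoopB]
  | cons v vs ih =>
    intro i reqs res c30 c5 h1 hdrop hc30 hc5
    have hi : i < reqs.length := by
      by_contra h
      rw [List.drop_eq_nil_iff.mpr (by omega)] at hdrop; simp at hdrop
    have hget : reqs[i]? = some v := by
      have := congrArg List.head? hdrop
      simpa [List.head?_drop] using this.symm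
    have hvs : vs = reqs.drop (i + 1) := by
      have := congrArg List.tail hdrop
      simpa [List.tail_drop] using this
    -- unfold one step of the range fold
    rw [PySem.List.pyRange_one_cons (by exact_mod_cast hi)]
    rw [List.foldl_cons]
    -- the read value
    have hv : PySem.List.pyGetD reqs ((i : Int)) "" = v := by
      rw [PySem.List.pyGetD_natCast]
      simp [List.getD, hget]
    -- windows as slices
    have hsl30 : PySem.List.slice reqs (some (max ((i : Int) - 30) 0)) (some (i : Int))
        = (reqs.take i).drop (i - 30) := by
      rw [show max ((i : Int) - 30) 0 = ((i - 30 : Nat) : Int) from by omega]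
      rw [PySem.List.slice_natCast, List.drop_take]
    have hsl5 : PySem.List.slice reqs (some (max ((i : Int) - 5) 0)) (some (i : Int))
        = (reqs.take i).drop (i - 5) := by
      rw [show max ((i : Int) - 5) 0 = ((i - 5 : Nat) : Int) from by omega]
      rw [PySem.List.slice_natCast, List.drop_take]
    rw [show pvStepA (reqs, res) (i : Int) = (if 5 ≤ List.count v ((reqs.take i).drop (i - 30)) then (reqs.set i "", res ++ [pvTooMany]) else if 2 ≤ List.count v ((reqs.take i).drop (i - 5)) then (reqs.set i "", res ++ [pvTooMany]) else (reqs, res ++ [pvOk])) from by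
      simp only [pvStepA, hv, hsl30, hsl5, PySem.List.count_eq, Int.toNat_natCast]]
    rw [show ((i : Int) + 1) = ((i + 1 : Nat) : Int) from by push_cast; ring]
    have ht : (reqs.take i).length = i := by simp [List.length_take]; omega
    -- shared continuation: process the rest from any state reached by this step
    have step : ∀ (x : String) (reqs' res' : List String),
        reqs'.take (i + 1) = reqs.take i ++ [x] →
        reqs'.length = reqs.length →
        reqs'.drop (i + 1) = reqs.drop (i + 1) →
        ((PySem.List.pyRange ((i + 1 : Nat) : Int) (reqs.length : Int) 1).foldl
          pvStepA (reqs', res')).2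
          = pvLoopB vs (pvPush ((reqs.take i).drop (i - 30)) c30 30 x).1
              (pvPush ((reqs.take i).drop (i - 30)) c30 30 x).2
              (pvPush ((reqs.take i).drop (i - 5)) c5 5 x).1
              (pvPush ((reqs.take i).drop (i - 5)) c5 5 x).2 res' := by
      intro x reqs' res' htake hlen' hdrop'
      have hW30 : (pvPush ((reqs.take i).drop (i - 30)) c30 30 x).1
          = (reqs'.take (i + 1)).drop (i + 1 - 30) := by
        have := pvPush_window (reqs.take i) x 30 (by norm_num) c30
        rw [ht] at this
        rw [this, htake]
      have hW5 : (pvPush ((reqs.take i).drop (i - 5)) c5 5 x).1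
          = (reqs'.take (i + 1)).drop (i + 1 - 5) := by
        have := pvPush_window (reqs.take i) x 5 (by norm_num) c5
        rw [ht] at this
        rw [this, htake]
      have hC30 := pvPush_count ((reqs.take i).drop (i - 30)) c30 30 x hc30
      have hC5 := pvPush_count ((reqs.take i).drop (i - 5)) c5 5 x hc5
      rw [hW30] at hC30
      rw [hW5] at hC5
      have := ih (i + 1) reqs' res'
        (pvPush ((reqs.take i).drop (i - 30)) c30 30 x).2
        (pvPush ((reqs.take i).drop (i - 5)) c5 5 x).2
        (by omega) (by rw [hvs, ← hdrop']) hC30 hC5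
      rw [hlen'] at this
      rw [this, hW30, hW5]
    -- B side: one step of pvLoopB, condition via the counters
    have hbcond : (5 ≤ c30.getD v 0 ∨ 2 ≤ c5.getD v 0)
        ↔ (5 ≤ List.count v ((reqs.take i).drop (i - 30))
            ∨ 2 ≤ List.count v ((reqs.take i).drop (i - 5))) := by
      rw [hc30 v, hc5 v]; omega
    simp only [pvLoopB]
    by_cases hf : 5 ≤ List.count v ((reqs.take i).drop (i - 30))
        ∨ 2 ≤ List.count v ((reqs.take i).drop (i - 5))
    · rw [if_pos (hbcond.mpr hf)]
      have hstate : (if 5 ≤ List.count v ((reqs.take i).drop (i - 30)) then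
            (reqs.set i "", res ++ [pvTooMany])
          else if 2 ≤ List.count v ((reqs.take i).drop (i - 5)) then
            (reqs.set i "", res ++ [pvTooMany])
          else (reqs, res ++ [pvOk])) = (reqs.set i "", res ++ [pvTooMany]) := by
        rcases hf with hf | hf
        · rw [if_pos hf]
        · split_ifs <;> simp_all
      rw [hstate]
      exact step "" (reqs.set i "") (res ++ [pvTooMany])
        (by rw [List.take_add_one, List.take_set_of_le (le_refl i),
                List.getElem?_set_self hi]; rfl)
        (by simp) (List.drop_set_of_lt (by omega))
    · rw [if_neg (fun hcc => hf (hbcond.mp hcc))]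
      rw [not_or] at hf
      rw [if_neg hf.1, if_neg hf.2]
      exact step v reqs (res ++ [pvOk])
        (by rw [List.take_add_one, hget]; rfl) rfl rfl

-- the initial windows/counters of B correspond to position i = 1
theorem pv_init (r0 : String) (rest : List String) :
    ∀ u, (pvPush [] PySem.Dict.empty 30 r0).2.getD u 0
        = ((((r0 :: rest).take 1).drop (1 - 30)).count u : Int) := by
  have h := pvPush_count [] PySem.Dict.empty 30 r0 (by intro u; simp)
  simpa using h

theorem pv_init5 (r0 : String) (rest : List String) :
    ∀ u, (pvPush [] PySem.Dict.empty 5 r0).2.getD u 0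
        = ((((r0 :: rest).take 1).drop (1 - 5)).count u : Int) := by
  have h := pvPush_count [] PySem.Dict.empty 5 r0 (by intro u; simp)
  simpa using h

-- ===== VERDICT (by name: the statement is the Claim_ definition above) =====
theorem getRequestStatus_spec : Claim_equal_getRequestStatus := by
  intro requests _
  unfold Spec_getRequestStatus
  cases requests with
  | nil => rfl
  | cons r0 rest =>
    have hA : getRequestStatus (r0 :: rest)
        = ((PySem.List.pyRange (1 : Int) (((r0 :: rest).length : Nat) : Int) 1).foldl
            pvStepA ((r0 :: rest), [pvOk])).2 := rfl
    rw [hA]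
    have := pv_main rest 1 (r0 :: rest) [pvOk]
      (pvPush [] PySem.Dict.empty 30 r0).2 (pvPush [] PySem.Dict.empty 5 r0).2
      (le_refl 1) rfl (pv_init r0 rest) (pv_init5 r0 rest)
    simp only [Nat.cast_one] at this
    rw [this]
    rfl
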